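-- pv_equiv track=rewrite | github.com/damieng-git/trading_app | apps/dashboard/sector_map.py | _ticker_geo
-- ===== SOURCE A (Python) =====
-- EU_SUFFIXES = {
--     ".PA", ".DE", ".AS", ".MI", ".MC", ".SW", ".VI", ".L", ".CO",
--     ".OL", ".HE", ".WA", ".BR", ".LS", ".IR",
-- }
--
-- def _ticker_geo(symbol: str) -> str:
--     """Return 'EU', 'US', or 'OTHER' based on ticker suffix."""
--     for suf in EU_SUFFIXES:
--         if symbol.upper().endswith(suf):
--             return "EU"
--     if "." not in symbol or symbol.endswith(".TO"):
--         return "US"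
--     special = {".SS", ".BO", ".T", ".SA"}
--     for suf in special:
--         if symbol.upper().endswith(suf):
--             return "OTHER"
--     return "OTHER"
-- ===== SOURCE B (Python) =====
-- EU_EXTENSIONS = {
--     "PA", "DE", "AS", "MI", "MC", "SW", "VI", "L", "CO",
--     "OL", "HE", "WA", "BR", "LS", "IR",
-- }
--
-- def _ticker_geo(symbol: str) -> str:
--     """Return 'EU', 'US', or 'OTHER' based on ticker suffix."""
--     if "." not in symbol:
--         return "US"
--     if symbol.upper().rsplit(".", 1)[-1] in EU_EXTENSIONS:
--         return "EU"
--     return "US" if symbol.endswith(".TO") else "OTHER"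
-- ===== Notes on version B (the rewrite author's own statement) =====
-- stated objective: simpler
-- what changed: Replaces the 15-iteration endswith loop (and the dead special-suffix loop) by extracting the token after the last dot once (rsplit) and testing set membership against bare extensions, with an early no-dot return.
import Mathlib
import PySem

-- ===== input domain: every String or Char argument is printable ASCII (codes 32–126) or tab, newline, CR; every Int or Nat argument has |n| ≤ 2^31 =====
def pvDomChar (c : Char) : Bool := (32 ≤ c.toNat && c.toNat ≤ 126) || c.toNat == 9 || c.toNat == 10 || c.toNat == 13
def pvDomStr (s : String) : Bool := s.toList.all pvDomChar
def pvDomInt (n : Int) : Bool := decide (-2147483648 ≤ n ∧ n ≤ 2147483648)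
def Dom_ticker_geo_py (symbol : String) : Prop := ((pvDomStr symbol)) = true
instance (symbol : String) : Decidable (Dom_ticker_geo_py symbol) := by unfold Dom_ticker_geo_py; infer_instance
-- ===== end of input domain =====

-- B replaces A's endswith loop over 15 dotted suffixes by one extraction of the token
-- after the last dot plus a set-membership test (objective: simpler); return values agree everywhere.

-- ===== PORT A =====
def euSuffixes : List String :=
  [".PA", ".DE", ".AS", ".MI", ".MC", ".SW", ".VI", ".L", ".CO",
   ".OL", ".HE", ".WA", ".BR", ".LS", ".IR"]

def specialSuffixes : List String := [".SS", ".BO", ".T", ".SA"]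

-- the for-loops with early return become List.any over the same literals
def ticker_geo_py (symbol : String) : String :=
  if euSuffixes.any (fun suf => PySem.Str.endswith (PySem.Str.upper symbol) suf) then "EU"
  else if !(PySem.Str.isIn "." symbol) || PySem.Str.endswith symbol ".TO" then "US"
  else if specialSuffixes.any (fun suf => PySem.Str.endswith (PySem.Str.upper symbol) suf) then "OTHER"
  else "OTHER"

-- ===== PORT B =====
def euExtensions : List String :=
  ["PA", "DE", "AS", "MI", "MC", "SW", "VI", "L", "CO",
   "OL", "HE", "WA", "BR", "LS", "IR"]

-- hand port of up.rsplit(".", 1)[-1]: the characters after the last '.'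
-- (exact for Python's rsplit last piece whenever '.' occurs in the string, which B checks first)
def lastExt (l : List Char) : List Char := (l.reverse.takeWhile (· != '.')).reverse

def ticker_geo_py_alt (symbol : String) : String :=
  if !(PySem.Str.isIn "." symbol) then "US"
  else if euExtensions.any (fun e => lastExt (PySem.Str.upper symbol).toList == e.toList) then "EU"
  else if PySem.Str.endswith symbol ".TO" then "US"
  else "OTHER"

-- ===== PRECONDITION & SPEC =====
def Spec_ticker_geo_py (symbol : String) (out : String) : Prop := out = ticker_geo_py_alt symbol
instance (symbol : String) (out : String) : Decidable (Spec_ticker_geo_py symbol out) := by unfold Spec_ticker_geo_py; infer_instance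

-- ===== CLAIM (what is proved, stated in full; the proofs are below) =====
def Claim_equal_ticker_geo_py : Prop := ∀ (symbol : String), Dom_ticker_geo_py symbol → Spec_ticker_geo_py symbol (ticker_geo_py symbol)

-- ===== LEMMAS AND PROOFS =====

theorem upperChar_eq_dot (c : Char) : PySem.Chars.upperChar c = '.' ↔ c = '.' := by
  simp only [PySem.Chars.upperChar, PySem.Chars.islower, Bool.and_eq_true, decide_eq_true_eq]
  split_ifs with h
  · obtain ⟨h1, h2⟩ := h
    have h1' : 97 ≤ c.toNat := h1
    have h2' : c.toNat ≤ 122 := h2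
    constructor
    · intro he
      exfalso
      have hv : (c.toNat - 32).isValidChar := Or.inl (by omega)
      have : (Char.ofNat (c.toNat - 32)).toNat = ('.' : Char).toNat := by rw [he]
      rw [Char.toNat_ofNat, if_pos hv] at this
      have hd : ('.' : Char).toNat = 46 := by decide
      omega
    · intro he; subst he; exact absurd h1' (by decide)
  · rfl

theorem mem_dot_upper (l : List Char) : '.' ∈ PySem.Chars.upper l ↔ '.' ∈ l := by
  simp only [PySem.Chars.upper, List.mem_map]
  constructor
  · rintro ⟨c, hc, he⟩
    rwa [(upperChar_eq_dot c).mp he] at hc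
  · intro h
    exact ⟨'.', h, (upperChar_eq_dot '.').mpr rfl⟩

theorem prefix_dot_iff (e r : List Char) (he : '.' ∉ e) :
    (e ++ ['.']) <+: r ↔ ('.' ∈ r ∧ r.takeWhile (· != '.') = e) := by
  induction r generalizing e with
  | nil => simp
  | cons c r ih =>
    cases e with
    | nil =>
      by_cases hc : c = '.'
      · subst hc; simp
      · simp [List.cons_prefix_cons, hc, Ne.symm hc]
    | cons a e' =>
      simp only [List.mem_cons, not_or] at he
      by_cases hc : c = a
      · subst hc
        have hcd : c ≠ '.' := fun h => he.1 h.symm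
        simp [List.cons_prefix_cons, hcd, ih e' he.2, Ne.symm hcd]
      · by_cases hcd : c = '.'
        · subst hcd
          simp [List.cons_prefix_cons, Ne.symm (he.1)]
        · constructor
          · intro hp
            rw [show a :: e' ++ ['.'] = a :: (e' ++ ['.']) from rfl, List.cons_prefix_cons] at hp
            exact absurd hp.1.symm hc
          · rintro ⟨-, ht⟩
            exfalso
            rw [List.takeWhile_cons, if_pos (by simpa using hcd)] at ht
            injection ht with h1 _
            exact hc h1

-- endswith a dotted suffix ↔ the string has a dot and its last extension is exactly that suffix
theorem endswith_dot_iff (l e : List Char) (he : '.' ∉ e) :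
    PySem.Chars.endswith l ('.' :: e) = true ↔ ('.' ∈ l ∧ lastExt l = e) := by
  rw [PySem.Chars.endswith_iff]
  have h1 : ('.' :: e) <:+ l ↔ (('.' :: e).reverse <+: l.reverse) := List.reverse_prefix.symm
  rw [h1]
  have h2 : ('.' :: e).reverse = e.reverse ++ ['.'] := by simp
  rw [h2, prefix_dot_iff _ _ (by simpa using he)]
  constructor
  · rintro ⟨hm, ht⟩
    refine ⟨by simpa using hm, ?_⟩
    unfold lastExt
    rw [ht, List.reverse_reverse]
  · rintro ⟨hm, ht⟩
    refine ⟨by simpa using hm, ?_⟩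
    unfold lastExt at ht
    have := congrArg List.reverse ht
    simpa using this

theorem isIn_dot_iff (s : String) :
    PySem.Str.isIn "." s = true ↔ '.' ∈ s.toList := by
  rw [PySem.Str.isIn_iff_infix]
  constructor
  · intro h
    exact h.mem (by simp [show ("." : String).toList = ['.'] from rfl])
  · intro h
    obtain ⟨l1, l2, heq⟩ := List.mem_iff_append.mp h
    exact ⟨l1, l2, by rw [heq]; simp [show ("." : String).toList = ['.'] from rfl]⟩

-- each EU suffix test of A, rewritten through endswith_dot_iff
theorem eu_any_iff (s : String) :
    (euSuffixes.any (fun suf => PySem.Str.endswith (PySem.Str.upper s) suf) = true)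
      ↔ ('.' ∈ s.toList ∧
          euExtensions.any (fun e => lastExt (PySem.Str.upper s).toList == e.toList) = true) := by
  have hup : ∀ e : List Char, '.' ∉ e →
      (PySem.Str.endswith (PySem.Str.upper s) (String.ofList ('.' :: e)) = true
        ↔ ('.' ∈ s.toList ∧ lastExt (PySem.Chars.upper s.toList) = e)) := by
    intro e he
    rw [PySem.Str.endswith_eq]
    have h0 : (String.ofList ('.' :: e)).toList = '.' :: e := by simp
    rw [h0, PySem.Str.toList_upper, endswith_dot_iff _ _ he, mem_dot_upper]
  simp only [euSuffixes, euExtensions, List.any_cons, List.any_nil, Bool.or_eq_true,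
    Bool.or_false]
  rw [show (".PA" : String) = String.ofList ('.' :: ['P','A']) from rfl,
      show (".DE" : String) = String.ofList ('.' :: ['D','E']) from rfl,
      show (".AS" : String) = String.ofList ('.' :: ['A','S']) from rfl,
      show (".MI" : String) = String.ofList ('.' :: ['M','I']) from rfl,
      show (".MC" : String) = String.ofList ('.' :: ['M','C']) from rfl,
      show (".SW" : String) = String.ofList ('.' :: ['S','W']) from rfl,
      show (".VI" : String) = String.ofList ('.' :: ['V','I']) from rfl,
      show (".L" : String) = String.ofList ('.' :: ['L']) from rfl,
      show (".CO" : String) = String.ofList ('.' :: ['C','O']) from rfl,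
      show (".OL" : String) = String.ofList ('.' :: ['O','L']) from rfl,
      show (".HE" : String) = String.ofList ('.' :: ['H','E']) from rfl,
      show (".WA" : String) = String.ofList ('.' :: ['W','A']) from rfl,
      show (".BR" : String) = String.ofList ('.' :: ['B','R']) from rfl,
      show (".LS" : String) = String.ofList ('.' :: ['L','S']) from rfl,
      show (".IR" : String) = String.ofList ('.' :: ['I','R']) from rfl]
  rw [hup _ (by decide), hup _ (by decide), hup _ (by decide), hup _ (by decide),
      hup _ (by decide), hup _ (by decide), hup _ (by decide), hup _ (by decide),
      hup _ (by decide), hup _ (by decide), hup _ (by decide), hup _ (by decide),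
      hup _ (by decide), hup _ (by decide), hup _ (by decide)]
  simp only [beq_iff_eq, PySem.Str.toList_upper]
  constructor
  · intro h
    rcases h with h|h|h|h|h|h|h|h|h|h|h|h|h|h|h <;> exact ⟨h.1, by simp [h.2]⟩
  · rintro ⟨hd, h⟩
    rcases h with h|h|h|h|h|h|h|h|h|h|h|h|h|h|h <;> simp [hd, h]

-- ===== VERDICT (by name: the statement is the Claim_ definition above) =====
theorem ticker_geo_py_spec : Claim_equal_ticker_geo_py := by
  intro symbol _
  unfold Spec_ticker_geo_py ticker_geo_py ticker_geo_py_alt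
  by_cases hd : PySem.Str.isIn "." symbol = true
  · have hd' : '.' ∈ symbol.toList := (isIn_dot_iff symbol).mp hd
    rw [hd]
    simp only [Bool.not_true, Bool.false_or, Bool.false_eq_true, if_false]
    by_cases heu : euExtensions.any (fun e => lastExt (PySem.Str.upper symbol).toList == e.toList) = true
    · rw [if_pos ((eu_any_iff symbol).mpr ⟨hd', by simpa [PySem.Str.toList_upper] using heu⟩),
          if_pos heu]
    · rw [if_neg (fun h => heu (by simpa [PySem.Str.toList_upper] using ((eu_any_iff symbol).mp h).2)),
          if_neg heu]
      by_cases hto : PySem.Str.endswith symbol ".TO" = true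
      · rw [if_pos hto, if_pos hto]
      · rw [if_neg hto, if_neg hto]
        cases hsp : specialSuffixes.any (fun suf => PySem.Str.endswith (PySem.Str.upper symbol) suf) <;>
          simp
  · have hb : PySem.Str.isIn "." symbol = false := eq_false_of_ne_true hd
    have hne : ¬ euSuffixes.any (fun suf => PySem.Str.endswith (PySem.Str.upper symbol) suf) = true := by
      intro h
      exact hd ((isIn_dot_iff symbol).mpr ((eu_any_iff symbol).mp h).1)
    rw [if_neg hne, hb]
    simp only [Bool.not_false, Bool.true_or, if_true]
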